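-- pv_equiv track=rewrite | github.com/kebishpius/Leet-Code-Python | 2525-CountNumberOfDistinctIntegersAfterReverseOperations/2525-CountNumberOfDistinctIntegersAfterReverseOperations.py | countDistinctIntegers
-- ===== SOURCE A (Python) =====
-- def countDistinctIntegers(nums):
--     y = len(nums)
--     for i in range(y):
--         x = str(nums[i])
--         nums.append(int(x[::-1]))
--     return len(list(set(nums)))
--
--     """
--     :type nums: List[int]
--     :rtype: int
--     """
-- ===== SOURCE B (Python) =====
-- def countDistinctIntegers(nums):
--     # same in-place mutation as A: append reversed version of each original element
--     for x in nums[:]: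
--         nums.append(int(str(x)[::-1]))
--     # count distinct by sort-then-scan instead of building a set
--     s = sorted(nums)
--     count = 0
--     prev = None
--     for v in s:
--         if prev is None or v != prev:
--             count += 1
--         prev = v
--     return count
-- ===== Notes on version B (the rewrite author's own statement) =====
-- stated objective: alternative
-- what changed: B iterates over a snapshot instead of indexing the growing list, and counts distinct values by sorting the mutated list and scanning adjacent pairs instead of materialising a set.
import Mathlib
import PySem

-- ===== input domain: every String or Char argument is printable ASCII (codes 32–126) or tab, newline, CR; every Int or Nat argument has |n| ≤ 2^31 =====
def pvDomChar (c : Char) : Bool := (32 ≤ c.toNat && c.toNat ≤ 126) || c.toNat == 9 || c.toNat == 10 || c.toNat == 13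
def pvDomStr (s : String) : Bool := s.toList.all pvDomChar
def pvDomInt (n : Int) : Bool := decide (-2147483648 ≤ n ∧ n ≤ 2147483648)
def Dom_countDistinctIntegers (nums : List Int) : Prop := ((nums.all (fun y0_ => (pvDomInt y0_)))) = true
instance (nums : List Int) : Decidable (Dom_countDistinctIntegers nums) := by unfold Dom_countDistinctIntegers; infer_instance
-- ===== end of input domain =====

-- B replaces index-into-growing-list + set() by snapshot iteration + sort-then-scan distinct
-- counting; equivalence is about the RETURN value (both Pythons also append to nums in place).

-- ===== PORT A =====
-- int(str(x)[::-1]); the .getD 0 is never reached under Pre_ (x ≥ 0 makes the reversed digits parse)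
def pvRev (x : Int) : Int :=
  ((PySem.Int.ofChars? ((PySem.Int.toChars x).reverse)).getD 0)

def countDistinctIntegers (nums : List Int) : Int :=
  let y : Nat := nums.length
  let final := (PySem.List.pyRange 0 (y : Int) 1).foldl
    (fun acc i => acc ++ [pvRev (PySem.List.pyGetD acc i 0)]) nums
  ((PySem.Set.ofList final).length : Int)

-- ===== PORT B =====
def countDistinctIntegers_alt (nums : List Int) : Int :=
  let final := nums.foldl (fun acc x => acc ++ [pvRev x]) nums
  let s := PySem.List.sorted final (fun v => v) false
  (s.foldl (fun (st : Int × Option Int) v =>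
      (if st.2 = some v then st.1 else st.1 + 1, some v)) (0, none)).1

-- ===== PRECONDITION & SPEC =====
-- Pre_ excludes lists containing a negative element: there str(x)[::-1] ends in '-' and
-- int() raises ValueError in both A and B.
def Pre_countDistinctIntegers (nums : List Int) : Prop := ∀ x ∈ nums, 0 ≤ x
instance (nums : List Int) : Decidable (Pre_countDistinctIntegers nums) := by
  unfold Pre_countDistinctIntegers; infer_instance
def pvWitness_countDistinctIntegers : List Int := [1, 13, 10, 13]

def Spec_countDistinctIntegers (nums : List Int) (out : Int) : Prop := out = countDistinctIntegers_alt nums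
instance (nums : List Int) (out : Int) : Decidable (Spec_countDistinctIntegers nums out) := by unfold Spec_countDistinctIntegers; infer_instance

-- ===== CLAIM (what is proved, stated in full; the proofs are below) =====
def Claim_equal_countDistinctIntegers : Prop := ∀ (nums : List Int), Dom_countDistinctIntegers nums → Pre_countDistinctIntegers nums → Spec_countDistinctIntegers nums (countDistinctIntegers nums)

-- ===== LEMMAS AND PROOFS =====

-- A's indexed loop over the growing list reads only its prefix L, so it builds L's map.
theorem loopA (L : List Int) : ∀ (s : Nat) (acc : List Int), L <+: acc →
    (PySem.List.pyRange (s : Int) (L.length : Int) 1).foldl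
      (fun a i => a ++ [pvRev (PySem.List.pyGetD a i 0)]) acc
    = acc ++ ((L.drop s).map pvRev) := by
  intro s
  induction hfuel : L.length - s using Nat.strong_induction_on generalizing s with
  | _ n ih =>
    intro acc hpre
    by_cases hs : s < L.length
    · rw [PySem.List.pyRange_one_cons (by exact_mod_cast hs)]
      simp only [List.foldl_cons]
      have hlen : s < acc.length := lt_of_lt_of_le hs hpre.length_le
      have hget : PySem.List.pyGetD acc (s : Int) 0 = L[s] := by
        rw [PySem.List.pyGetD_eq_getElem acc 0 (Int.natCast_nonneg s) (by exact_mod_cast hlen)]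
        simp only [Int.toNat_natCast]
        exact (List.IsPrefix.getElem hpre hs).symm
      have hcast : ((s : Int) + 1) = ((s + 1 : Nat) : Int) := by push_cast; ring
      rw [hget, hcast,
          ih (L.length - (s + 1)) (by omega) (s + 1) rfl _
            (hpre.trans (List.prefix_append acc _)),
          List.drop_eq_getElem_cons hs]
      simp only [List.map_cons, List.append_assoc, List.singleton_append]
    · rw [PySem.List.pyRange_one_eq_nil (by exact_mod_cast Nat.le_of_not_lt hs)]
      simp [List.drop_eq_nil_of_le (Nat.le_of_not_lt hs)]

-- number of distinct elements of l other than the previously seen value p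
def pvD (l : List Int) (p : Option Int) : Nat :=
  match p with
  | none => l.toFinset.card
  | some q => (l.toFinset.erase q).card

-- B's scan over a sorted list counts the distinct values not yet seen.
theorem scan_count : ∀ (l : List Int), l.Pairwise (· ≤ ·) →
    ∀ (c : Int) (p : Option Int), (∀ q, p = some q → ∀ x ∈ l, q ≤ x) →
    (l.foldl (fun (st : Int × Option Int) v =>
        (if st.2 = some v then st.1 else st.1 + 1, some v)) (c, p)).1
    = c + (pvD l p : Int) := by
  intro l
  induction l with
  | nil => intro _ c p _; cases p <;> simp [pvD]
  | cons a t iht =>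
    intro hl c p hp
    have hat : ∀ x ∈ t, a ≤ x := fun x hx => List.rel_of_pairwise_cons hl hx
    have ht : t.Pairwise (· ≤ ·) := hl.of_cons
    rw [List.foldl_cons]
    change (List.foldl (fun (st : Int × Option Int) v =>
        (if st.2 = some v then st.1 else st.1 + 1, some v))
        (if p = some a then c else c + 1, some a) t).1 = c + (pvD (a :: t) p : Int)
    have hcard : (((insert a t.toFinset).card : Nat) : Int) = ((t.toFinset.erase a).card : Int) + 1 := by
      have h1 : insert a t.toFinset = insert a (t.toFinset.erase a) := by
        ext x; by_cases hxa : x = a <;> simp [hxa]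
      rw [h1, Finset.card_insert_of_notMem (Finset.notMem_erase a _)]
      push_cast; ring
    by_cases hpa : p = some a
    · rw [if_pos hpa, iht ht c (some a) (fun q hq x hx => by cases hq; exact hat x hx)]
      subst hpa
      simp [pvD, List.toFinset_cons, Finset.erase_insert_eq_erase]
    · rw [if_neg hpa, iht ht (c + 1) (some a) (fun q hq x hx => by cases hq; exact hat x hx)]
      cases p with
      | none =>
        simp only [pvD, List.toFinset_cons]
        rw [hcard]; ring
      | some q =>
        have hqa : q < a :=
          lt_of_le_of_ne (hp q rfl a (by simp)) (fun h => hpa (by rw [h]))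
        have hqn : q ∉ List.toFinset (a :: t) := by
          simp only [List.mem_toFinset, List.mem_cons]
          rintro (rfl | hmem)
          · exact absurd hqa (lt_irrefl _)
          · exact absurd hqa (not_lt.mpr (hat q hmem))
        have hqn' : q ∉ insert a t.toFinset := by
          simpa [List.toFinset_cons] using hqn
        simp only [pvD, List.toFinset_cons, Finset.erase_eq_of_notMem hqn']
        rw [hcard]; ring

theorem len_ofList (l : List Int) : (PySem.Set.ofList l).length = l.toFinset.card := by
  have hnd : (PySem.Set.ofList l).Nodup := PySem.Set.nodup_ofList l
  have hset : (PySem.Set.ofList l).toFinset = l.toFinset := by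
    ext x; simp [PySem.Set.mem_ofList]
  rw [← hset, List.toFinset_card_of_nodup hnd]

-- ===== VERDICT (by name: the statement is the Claim_ definition above) =====
theorem countDistinctIntegers_spec : Claim_equal_countDistinctIntegers := by
  intro nums _ _
  unfold Spec_countDistinctIntegers countDistinctIntegers countDistinctIntegers_alt
  simp only []
  have hA := loopA nums 0 nums (List.prefix_refl nums)
  simp only [Nat.cast_zero] at hA
  rw [hA, List.drop_zero]
  have hB : nums.foldl (fun acc x => acc ++ [pvRev x]) nums = nums ++ nums.map pvRev :=
    PySem.List.foldl_append_singleton_eq_map pvRev nums nums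
  rw [hB]
  have hs : (PySem.List.sorted (nums ++ nums.map pvRev) (fun v => v) false).Pairwise (· ≤ ·) :=
    PySem.List.sorted_pairwise (nums ++ nums.map pvRev) (fun v => v)
  rw [scan_count _ hs 0 none (by intro q h; cases h)]
  have hfs : (PySem.List.sorted (nums ++ nums.map pvRev) (fun v => v) false).toFinset
      = (nums ++ nums.map pvRev).toFinset := by
    ext x; simp [PySem.List.mem_sorted]
  rw [len_ofList]
  simp [pvD, hfs]
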